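-- pv_equiv track=rewrite | github.com/ArlingtonCS/aps-hspc-2025-middleschool | problems/E-ocean-depth-range/solution/ocean-depth-range.py | count_ocean_zones
-- ===== SOURCE A (Python) =====
-- def count_ocean_zones(depths):
--     zone_counts = {
--         "Sunlight Zone": 0,
--         "Twilight Zone": 0,
--         "Midnight Zone": 0,
--         "Abyssal Zone": 0,
--         "Trenches": 0
--     }
--
--     for depth in depths:
--         # zone = classify_ocean_zone(depth)
--         if depth >= 0 and depth <= 200:
--             zone_counts["Sunlight Zone"] += 1
--         elif depth >= 201 and depth <= 1000:
--             zone_counts["Twilight Zone"] += 1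
--         elif depth >= 1001 and depth <= 4000:
--             zone_counts["Midnight Zone"] += 1
--         elif depth >= 4001 and depth <= 6000:
--             zone_counts["Abyssal Zone"] += 1
--         elif depth >= 6001:
--             zone_counts["Trenches"] += 1
--
--     return zone_counts
-- ===== SOURCE B (Python) =====
-- ZONES = [
--     ("Sunlight Zone", 0, 200),
--     ("Twilight Zone", 201, 1000),
--     ("Midnight Zone", 1001, 4000),
--     ("Abyssal Zone", 4001, 6000),
--     ("Trenches", 6001, None),
-- ]
--
-- def count_ocean_zones(depths):
--     # per-zone counting pass over a data-driven range table (zones are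
--     # disjoint for integer depths, so independent counts match A's cascade)
--     return {name: sum(1 for d in depths
--                       if lo <= d and (hi is None or d <= hi))
--             for name, lo, hi in ZONES}
-- ===== Notes on version B (the rewrite author's own statement) =====
-- stated objective: simpler
-- what changed: Replaces the per-depth if/elif cascade mutating a dict with a data-driven zone table and one independent counting pass per zone (a dict comprehension of sums), relying on the integer zone ranges being disjoint.
import Mathlib
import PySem

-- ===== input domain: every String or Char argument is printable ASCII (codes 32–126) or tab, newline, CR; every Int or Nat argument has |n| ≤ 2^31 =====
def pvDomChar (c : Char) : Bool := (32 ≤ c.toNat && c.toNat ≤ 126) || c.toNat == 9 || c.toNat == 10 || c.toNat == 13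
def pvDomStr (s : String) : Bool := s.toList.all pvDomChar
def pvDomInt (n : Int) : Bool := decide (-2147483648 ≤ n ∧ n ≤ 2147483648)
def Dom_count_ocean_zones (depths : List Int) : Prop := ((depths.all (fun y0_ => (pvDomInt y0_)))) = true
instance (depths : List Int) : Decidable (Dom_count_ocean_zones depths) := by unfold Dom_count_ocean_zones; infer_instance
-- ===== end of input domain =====

-- B replaces the if/elif cascade over a mutated dict by a data-driven zone table
-- with one independent counting pass per zone (objective: simpler).

-- ===== PORT A =====
def count_ocean_zones (depths : List Int) : List (String × Int) :=
  let init : PySem.Dict String Int := PySem.Dict.ofList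
    [("Sunlight Zone", 0), ("Twilight Zone", 0), ("Midnight Zone", 0),
     ("Abyssal Zone", 0), ("Trenches", 0)]
  (depths.foldl (fun zc depth =>
      if depth ≥ 0 ∧ depth ≤ 200 then zc.modify "Sunlight Zone" 0 (· + 1)
      else if depth ≥ 201 ∧ depth ≤ 1000 then zc.modify "Twilight Zone" 0 (· + 1)
      else if depth ≥ 1001 ∧ depth ≤ 4000 then zc.modify "Midnight Zone" 0 (· + 1)
      else if depth ≥ 4001 ∧ depth ≤ 6000 then zc.modify "Abyssal Zone" 0 (· + 1)
      else if depth ≥ 6001 then zc.modify "Trenches" 0 (· + 1)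
      else zc) init).items

-- ===== PORT B =====
def pvZones : List (String × Int × Option Int) :=
  [("Sunlight Zone", 0, some 200), ("Twilight Zone", 201, some 1000),
   ("Midnight Zone", 1001, some 4000), ("Abyssal Zone", 4001, some 6000),
   ("Trenches", 6001, none)]

-- sum(1 for d in depths if lo <= d and (hi is None or d <= hi))
def pvZoneCount (depths : List Int) (lo : Int) (hi : Option Int) : Int :=
  depths.foldl (fun acc d =>
    if lo ≤ d ∧ (hi.all (fun h => decide (d ≤ h)) = true) then acc + 1 else acc) 0

def count_ocean_zones_alt (depths : List Int) : List (String × Int) :=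
  pvZones.map (fun z => (z.1, pvZoneCount depths z.2.1 z.2.2))

-- ===== PRECONDITION & SPEC =====
def Spec_count_ocean_zones (depths : List Int) (out : List (String × Int)) : Prop := out = count_ocean_zones_alt depths
instance (depths : List Int) (out : List (String × Int)) : Decidable (Spec_count_ocean_zones depths out) := by unfold Spec_count_ocean_zones; infer_instance

-- ===== CLAIM (what is proved, stated in full; the proofs are below) =====
def Claim_equal_count_ocean_zones : Prop := ∀ (depths : List Int), Dom_count_ocean_zones depths → Spec_count_ocean_zones depths (count_ocean_zones depths)

-- ===== LEMMAS AND PROOFS =====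

theorem pvZoneCount_from (lo : Int) (hi : Option Int) (l : List Int) (acc : Int) :
    l.foldl (fun acc d =>
      if lo ≤ d ∧ (hi.all (fun h => decide (d ≤ h)) = true) then acc + 1 else acc) acc
    = acc + (l.countP (fun d =>
        decide (lo ≤ d ∧ (hi.all (fun h => decide (d ≤ h)) = true))) : Nat) := by
  induction l generalizing acc with
  | nil => simp
  | cons x l ih =>
    simp only [List.foldl_cons, List.countP_cons, ih]
    by_cases h : lo ≤ x ∧ (Option.all (fun h => decide (x ≤ h)) hi = true)
    · simp only [decide_eq_true_eq, h]
      simp only [and_self, if_true]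
      omega
    · simp only [decide_eq_true_eq, if_neg h]
      simp

theorem count_ocean_zones_inv (l : List Int) (a b c d e : Int) :
    (l.foldl (fun zc depth =>
      if depth ≥ 0 ∧ depth ≤ 200 then zc.modify "Sunlight Zone" 0 (· + 1)
      else if depth ≥ 201 ∧ depth ≤ 1000 then zc.modify "Twilight Zone" 0 (· + 1)
      else if depth ≥ 1001 ∧ depth ≤ 4000 then zc.modify "Midnight Zone" 0 (· + 1)
      else if depth ≥ 4001 ∧ depth ≤ 6000 then zc.modify "Abyssal Zone" 0 (· + 1)
      else if depth ≥ 6001 then zc.modify "Trenches" 0 (· + 1)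
      else zc)
      (PySem.Dict.mk [("Sunlight Zone", a), ("Twilight Zone", b), ("Midnight Zone", c),
                      ("Abyssal Zone", d), ("Trenches", e)])).items
    = [("Sunlight Zone", a + (l.countP (fun x => decide (x ≥ 0 ∧ x ≤ 200)) : Nat)),
       ("Twilight Zone", b + (l.countP (fun x => decide (x ≥ 201 ∧ x ≤ 1000)) : Nat)),
       ("Midnight Zone", c + (l.countP (fun x => decide (x ≥ 1001 ∧ x ≤ 4000)) : Nat)),
       ("Abyssal Zone", d + (l.countP (fun x => decide (x ≥ 4001 ∧ x ≤ 6000)) : Nat)),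
       ("Trenches", e + (l.countP (fun x => decide (x ≥ 6001)) : Nat))] := by
  induction l generalizing a b c d e with
  | nil => simp
  | cons x l ih =>
    simp only [List.foldl_cons]
    split_ifs with h1 h2 h3 h4 h5
    · have hm : (PySem.Dict.mk [("Sunlight Zone", a), ("Twilight Zone", b), ("Midnight Zone", c),
          ("Abyssal Zone", d), ("Trenches", e)]).modify "Sunlight Zone" 0 (· + 1)
          = PySem.Dict.mk [("Sunlight Zone", a + 1), ("Twilight Zone", b), ("Midnight Zone", c),
          ("Abyssal Zone", d), ("Trenches", e)] := rfl
      rw [hm, ih]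
      simp only [List.countP_cons]
      simp [h1]
      omega
    · have hm : (PySem.Dict.mk [("Sunlight Zone", a), ("Twilight Zone", b), ("Midnight Zone", c),
          ("Abyssal Zone", d), ("Trenches", e)]).modify "Twilight Zone" 0 (· + 1)
          = PySem.Dict.mk [("Sunlight Zone", a), ("Twilight Zone", b + 1), ("Midnight Zone", c),
          ("Abyssal Zone", d), ("Trenches", e)] := rfl
      rw [hm, ih]
      simp only [List.countP_cons]
      simp [h1, h2]
      omega
    · have hm : (PySem.Dict.mk [("Sunlight Zone", a), ("Twilight Zone", b), ("Midnight Zone", c),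
          ("Abyssal Zone", d), ("Trenches", e)]).modify "Midnight Zone" 0 (· + 1)
          = PySem.Dict.mk [("Sunlight Zone", a), ("Twilight Zone", b), ("Midnight Zone", c + 1),
          ("Abyssal Zone", d), ("Trenches", e)] := rfl
      rw [hm, ih]
      simp only [List.countP_cons]
      simp [h1, h2, h3]
      omega
    · have hm : (PySem.Dict.mk [("Sunlight Zone", a), ("Twilight Zone", b), ("Midnight Zone", c),
          ("Abyssal Zone", d), ("Trenches", e)]).modify "Abyssal Zone" 0 (· + 1)
          = PySem.Dict.mk [("Sunlight Zone", a), ("Twilight Zone", b), ("Midnight Zone", c),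
          ("Abyssal Zone", d + 1), ("Trenches", e)] := rfl
      rw [hm, ih]
      simp only [List.countP_cons]
      simp [h1, h2, h3, h4]
      omega
    · have hm : (PySem.Dict.mk [("Sunlight Zone", a), ("Twilight Zone", b), ("Midnight Zone", c),
          ("Abyssal Zone", d), ("Trenches", e)]).modify "Trenches" 0 (· + 1)
          = PySem.Dict.mk [("Sunlight Zone", a), ("Twilight Zone", b), ("Midnight Zone", c),
          ("Abyssal Zone", d), ("Trenches", e + 1)] := rfl
      rw [hm, ih]
      simp only [List.countP_cons]
      simp [h1, h2, h3, h4, h5]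
      omega
    · rw [ih]
      simp only [List.countP_cons]
      simp [h1, h2, h3, h4, h5]

theorem count_ocean_zones_spec : Claim_equal_count_ocean_zones := by
  intro depths _
  unfold Spec_count_ocean_zones count_ocean_zones count_ocean_zones_alt pvZones pvZoneCount
  have hof : PySem.Dict.ofList
      [("Sunlight Zone", (0 : Int)), ("Twilight Zone", 0), ("Midnight Zone", 0),
       ("Abyssal Zone", 0), ("Trenches", 0)]
      = PySem.Dict.mk [("Sunlight Zone", 0), ("Twilight Zone", 0), ("Midnight Zone", 0),
       ("Abyssal Zone", 0), ("Trenches", 0)] := rfl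
  rw [hof, count_ocean_zones_inv]
  simp only [List.map_cons, List.map_nil, pvZoneCount_from]
  simp
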